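-- pv_equiv track=rewrite | github.com/nimishh2002-max/EvoForensic | .ipynb_checkpoints/ResearchMode-checkpoint.py | is_real_world_illegal_intent
-- ===== SOURCE A (Python) =====
-- def is_real_world_illegal_intent(q: str) -> bool:
--     q = q.lower()
--
--     # Asking about the DOCUMENT is always allowed
--     if any(x in q for x in ["in the file", "in the document", "in the case", "according to"]):
--         return False
--
--     intent_patterns = ["how do i", "how can i", "show me how", "steps to", "instructions to"]
--     illegal_actions = [
--         "kill", "murder", "poison", "hurt someone", "harm someone",
--         "commit a crime", "evade police", "hide evidence", "break into"
--     ]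
--
--     for p in intent_patterns:
--         for a in illegal_actions:
--             if p in q and a in q:
--                 return True
--
--     return False
-- ===== SOURCE B (Python) =====
-- _TAGGED_PATTERNS = [
--     ("in the file", "allow"), ("in the document", "allow"),
--     ("in the case", "allow"), ("according to", "allow"),
--     ("how do i", "intent"), ("how can i", "intent"), ("show me how", "intent"),
--     ("steps to", "intent"), ("instructions to", "intent"),
--     ("kill", "action"), ("murder", "action"), ("poison", "action"),
--     ("hurt someone", "action"), ("harm someone", "action"),
--     ("commit a crime", "action"), ("evade police", "action"),
--     ("hide evidence", "action"), ("break into", "action"),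
-- ]
--
-- def is_real_world_illegal_intent(q: str) -> bool:
--     q = q.lower()
--     found = {tag for pat, tag in _TAGGED_PATTERNS if pat in q}
--     return "allow" not in found and "intent" in found and "action" in found
-- ===== Notes on version B (the rewrite author's own statement) =====
-- stated objective: alternative
-- what changed: A's early-return allow-list guard plus nested pattern-by-action double loop is replaced by a single classification pass: all patterns live in one tagged table, one comprehension collects the set of categories whose pattern occurs in the query, and the verdict is a boolean formula over that category set.
import Mathlib
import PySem

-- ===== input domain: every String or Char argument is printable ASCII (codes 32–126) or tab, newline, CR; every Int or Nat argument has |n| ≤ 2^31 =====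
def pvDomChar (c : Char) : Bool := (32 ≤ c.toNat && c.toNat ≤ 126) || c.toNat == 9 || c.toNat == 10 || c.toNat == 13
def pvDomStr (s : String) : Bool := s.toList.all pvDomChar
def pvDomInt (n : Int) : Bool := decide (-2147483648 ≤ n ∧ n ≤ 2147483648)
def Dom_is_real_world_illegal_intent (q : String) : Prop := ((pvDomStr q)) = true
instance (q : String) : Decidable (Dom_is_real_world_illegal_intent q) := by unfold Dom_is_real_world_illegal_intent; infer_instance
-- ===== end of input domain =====

-- B replaces A's allow-list guard plus nested pattern×action double loop by one classification
-- pass: a single tagged pattern table, a set of the categories found in the query, and a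
-- boolean formula over that set (alternative decomposition, same result).

-- ===== PORT A =====
-- A's nested loop 'for p: for a: if p in q and a in q: return true' is the early-exit
-- search List.any over intent_patterns of List.any over illegal_actions.
def is_real_world_illegal_intent (q : String) : Bool :=
  let q := PySem.Str.lower q
  if ["in the file", "in the document", "in the case", "according to"].any
      (fun x => PySem.Str.isIn x q) then
    false
  else
    let intent_patterns := ["how do i", "how can i", "show me how", "steps to", "instructions to"]
    let illegal_actions := ["kill", "murder", "poison", "hurt someone", "harm someone",
      "commit a crime", "evade police", "hide evidence", "break into"]
    intent_patterns.any (fun p => illegal_actions.any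
      (fun a => PySem.Str.isIn p q && PySem.Str.isIn a q))

-- ===== PORT B =====
def pvTaggedPatterns : List (String × String) :=
  [("in the file", "allow"), ("in the document", "allow"),
   ("in the case", "allow"), ("according to", "allow"),
   ("how do i", "intent"), ("how can i", "intent"), ("show me how", "intent"),
   ("steps to", "intent"), ("instructions to", "intent"),
   ("kill", "action"), ("murder", "action"), ("poison", "action"),
   ("hurt someone", "action"), ("harm someone", "action"),
   ("commit a crime", "action"), ("evade police", "action"),
   ("hide evidence", "action"), ("break into", "action")]

def is_real_world_illegal_intent_alt (q : String) : Bool :=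
  let q := PySem.Str.lower q
  -- '{tag for pat, tag in _TAGGED_PATTERNS if pat in q}' = the set of matching tags
  let found : PySem.Set String :=
    PySem.Set.ofList ((pvTaggedPatterns.filter (fun pt => PySem.Str.isIn pt.1 q)).map
      (fun pt => pt.2))
  !(PySem.Set.contains found "allow") && PySem.Set.contains found "intent"
    && PySem.Set.contains found "action"

-- ===== PRECONDITION & SPEC =====
def Spec_is_real_world_illegal_intent (q : String) (out : Bool) : Prop := out = is_real_world_illegal_intent_alt q
instance (q : String) (out : Bool) : Decidable (Spec_is_real_world_illegal_intent q out) := by unfold Spec_is_real_world_illegal_intent; infer_instance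

-- ===== CLAIM (what is proved, stated in full; the proofs are below) =====
def Claim_equal_is_real_world_illegal_intent : Prop := ∀ (q : String), Dom_is_real_world_illegal_intent q → Spec_is_real_world_illegal_intent q (is_real_world_illegal_intent q)

-- ===== LEMMAS AND PROOFS =====

-- Membership of a tag in B's category set = an existence search over the tagged table.
theorem contains_found (q : String) (t : String) :
    PySem.Set.contains
      (PySem.Set.ofList ((pvTaggedPatterns.filter (fun pt => PySem.Str.isIn pt.1 q)).map
        (fun pt => pt.2))) t
      = pvTaggedPatterns.any (fun pt => PySem.Str.isIn pt.1 q && pt.2 == t) := by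
  rw [Bool.eq_iff_iff]
  simp only [PySem.Set.contains_iff, PySem.Set.mem_ofList, List.mem_map, List.mem_filter,
    List.any_eq_true, Bool.and_eq_true, beq_iff_eq]
  constructor
  · rintro ⟨p, ⟨hmem, hin⟩, ht⟩; exact ⟨p, hmem, hin, ht⟩
  · rintro ⟨p, hmem, hin, ht⟩; exact ⟨p, ⟨hmem, hin⟩, ht⟩

-- The nested pair-search equals the conjunction of the two independent searches.
theorem any_any_and (f g : String → Bool) (l₁ l₂ : List String) :
    l₁.any (fun p => l₂.any (fun a => f p && g a)) = (l₁.any f && l₂.any g) := by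
  induction l₁ with
  | nil => simp
  | cons p t ih =>
      cases h : f p <;> simp [List.any_cons, ih, h]

-- For each tag, the search over the tagged table is the search over that tag's pattern list.
theorem tagged_allow (q : String) :
    pvTaggedPatterns.any (fun pt => PySem.Str.isIn pt.1 q && pt.2 == "allow")
      = ["in the file", "in the document", "in the case", "according to"].any
          (fun x => PySem.Str.isIn x q) := by
  simp [pvTaggedPatterns, List.any_cons]

theorem tagged_intent (q : String) :
    pvTaggedPatterns.any (fun pt => PySem.Str.isIn pt.1 q && pt.2 == "intent")
      = ["how do i", "how can i", "show me how", "steps to", "instructions to"].any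
          (fun p => PySem.Str.isIn p q) := by
  simp [pvTaggedPatterns, List.any_cons]

theorem tagged_action (q : String) :
    pvTaggedPatterns.any (fun pt => PySem.Str.isIn pt.1 q && pt.2 == "action")
      = ["kill", "murder", "poison", "hurt someone", "harm someone",
         "commit a crime", "evade police", "hide evidence", "break into"].any
          (fun a => PySem.Str.isIn a q) := by
  simp [pvTaggedPatterns, List.any_cons]

-- ===== VERDICT (by name: the statement is the Claim_ definition above) =====
theorem is_real_world_illegal_intent_spec : Claim_equal_is_real_world_illegal_intent := by
  intro q _
  unfold Spec_is_real_world_illegal_intent is_real_world_illegal_intent is_real_world_illegal_intent_alt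
  simp only [contains_found, tagged_allow, tagged_intent, tagged_action, any_any_and]
  cases hg : ["in the file", "in the document", "in the case", "according to"].any
      (fun x => PySem.Str.isIn x (PySem.Str.lower q)) <;> simp
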